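-- pv_equiv track=rewrite | github.com/SHU-sy/studyLanguage | Python3/프로그래머스/0/120837. 개미 군단/개미 군단.py | solution
-- ===== SOURCE A (Python) =====
-- def solution(hp):
--     count = 0
--     attacks = [5, 3, 1]
--     for attack in attacks:
--         temp = hp//attack
--         count += temp
--         hp -= temp * attack
--         if hp == 0:
--             return count
-- ===== SOURCE B (Python) =====
-- _TABLE = (0, 1, 2, 1, 2, 1, 2, 3, 2, 3, 2, 3, 4, 3, 4)
--
-- def solution(hp):
--     q, r = divmod(hp, 15)
--     return 3 * q + _TABLE[r]
-- ===== Notes on version B (the rewrite author's own statement) =====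
-- stated objective: alternative
-- what changed: Replaced the greedy loop over the attack denominations with a period-15 reduction: one divmod by 15 plus a precomputed 15-entry lookup table (the answer increases by exactly 3 per 15 hp).
import Mathlib
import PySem

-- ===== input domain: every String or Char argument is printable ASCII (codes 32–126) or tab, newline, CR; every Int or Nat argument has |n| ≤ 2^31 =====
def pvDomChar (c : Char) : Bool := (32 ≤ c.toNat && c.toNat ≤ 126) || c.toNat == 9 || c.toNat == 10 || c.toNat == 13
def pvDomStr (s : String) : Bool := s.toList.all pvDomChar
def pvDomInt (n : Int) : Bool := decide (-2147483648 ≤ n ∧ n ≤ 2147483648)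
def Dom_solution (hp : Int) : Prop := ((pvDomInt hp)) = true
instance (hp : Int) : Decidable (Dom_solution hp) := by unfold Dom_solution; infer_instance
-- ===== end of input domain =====

-- B replaces A's greedy loop over the attack list with a period-15 reduction (divmod by 15 + a 15-entry lookup table); objective: alternative.


-- ===== PORT A =====
-- the for-loop with early return; none = Python falling off the loop (unreachable:
-- the last attack value 1 always leaves hp == 0)
def solutionLoop : List Int → Int → Int → Option Int
  | [], _, _ => none
  | attack :: rest, hp, count =>
    let temp := PySem.Int.floordiv hp attack
    let count' := count + temp
    let hp' := hp - temp * attack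
    if hp' = 0 then some count' else solutionLoop rest hp' count'

def solution (hp : Int) : Int := (solutionLoop [5, 3, 1] hp 0).getD 0

-- ===== PORT B =====
def pvTable : List Int := [0, 1, 2, 1, 2, 1, 2, 3, 2, 3, 2, 3, 4, 3, 4]

-- divmod(hp, 15) never fails (15 ≠ 0) and the table index r is always in [0, 15),
-- so the two .getD defaults are unreachable (Python would raise there).
def solution_alt (hp : Int) : Int :=
  match PySem.Int.divmod? hp 15 with
  | some (q, r) => 3 * q + (PySem.List.pyGet? pvTable r).getD 0
  | none => 0

-- ===== PRECONDITION & SPEC =====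
def Spec_solution (hp : Int) (out : Int) : Prop := out = solution_alt hp
instance (hp : Int) (out : Int) : Decidable (Spec_solution hp out) := by unfold Spec_solution; infer_instance

-- ===== CLAIM (what is proved, stated in full; the proofs are below) =====
def Claim_equal_solution : Prop := ∀ (hp : Int), Dom_solution hp → Spec_solution hp (solution hp)

-- ===== LEMMAS AND PROOFS =====
theorem a_closed (hp : Int) : solution hp = hp / 5 + hp % 5 / 3 + hp % 5 % 3 := by
  unfold solution solutionLoop
  have f5 : PySem.Int.floordiv hp 5 = hp / 5 := PySem.Int.floordiv_eq_ediv_of_pos (by norm_num)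
  have f3 : ∀ a : Int, PySem.Int.floordiv a 3 = a / 3 := fun a => PySem.Int.floordiv_eq_ediv_of_pos (by norm_num)
  have f1 : ∀ a : Int, PySem.Int.floordiv a 1 = a / 1 := fun a => PySem.Int.floordiv_eq_ediv_of_pos (by norm_num)
  simp only [solutionLoop, f5, f3, f1]
  split_ifs <;> simp_all <;> omega

-- ===== VERDICT (by name: the statement is the Claim_ definition above) =====
theorem solution_spec : Claim_equal_solution := by
  intro hp _
  unfold Spec_solution solution_alt
  rw [a_closed]
  have hfd : hp.fdiv 15 = hp / 15 := by rw [Int.fdiv_eq_ediv]; norm_num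
  have hfm : hp.fmod 15 = hp % 15 := by rw [Int.fmod_eq_emod]; norm_num
  have hlo : 0 ≤ hp % 15 := Int.emod_nonneg hp (by norm_num)
  have hhi : hp % 15 < 15 := Int.emod_lt_of_pos hp (by norm_num)
  simp only [PySem.Int.divmod?, PySem.Int.floordiv?, hfd, hfm]
  norm_num
  generalize hrm : hp % 15 = r at *
  interval_cases r <;>
    · simp [PySem.List.pyGet?, PySem.List.pyIdx?, pvTable]
      omega
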